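-- pv_equiv track=rewrite | github.com/vignesh07102001/PYTHON | Best_subset_Hackwithinfy.py | check_triangle
-- ===== SOURCE A (Python) =====
-- from itertools import permutations
--
-- def check_triangle(Z):
--     count = 0
--     B=[]
--     B=list(permutations(Z,3))
--     for i in B:
--         a=i[0]
--         b=i[1]
--         c=i[2]
--         if(a+b>c and a+c>b and b+c>a):
--             count = count+1
--     if (count==len(B)):
--         return len(Z)
--     else:
--         return -1
-- ===== SOURCE B (Python) =====
-- def check_triangle(Z):
--     n = len(Z)
--     if n < 3:
--         return n
--     s = sorted(Z)
--     return n if s[0] + s[1] > s[-1] else -1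
-- ===== Notes on version B (the rewrite author's own statement) =====
-- stated objective: faster
-- what changed: Replaced the O(n^3) scan of all ordered triples from itertools.permutations with sort-then-one-comparison: every triple is a triangle iff the two smallest elements sum to more than the largest.
import Mathlib
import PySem

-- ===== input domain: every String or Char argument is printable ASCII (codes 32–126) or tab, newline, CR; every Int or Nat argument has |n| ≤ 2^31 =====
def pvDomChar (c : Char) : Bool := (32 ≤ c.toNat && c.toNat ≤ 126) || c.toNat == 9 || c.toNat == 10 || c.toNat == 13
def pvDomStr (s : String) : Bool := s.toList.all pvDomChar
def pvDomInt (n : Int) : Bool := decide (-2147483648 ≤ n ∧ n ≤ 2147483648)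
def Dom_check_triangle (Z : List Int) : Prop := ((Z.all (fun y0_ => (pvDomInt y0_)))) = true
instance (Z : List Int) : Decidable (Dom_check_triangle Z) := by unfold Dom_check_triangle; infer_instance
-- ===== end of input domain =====

-- B replaces A's scan of all ordered triples with sort + one comparison (two smallest vs largest); return value proved equal.

-- ===== PORT A =====
def check_triangle (Z : List Int) : Int :=
  let B := PySem.List.permutations Z 3
  let count : Int := B.foldl (fun count i =>
    match PySem.List.pyGet? i 0, PySem.List.pyGet? i 1, PySem.List.pyGet? i 2 with
    | some a, some b, some c =>
        if a + b > c ∧ a + c > b ∧ b + c > a then count + 1 else count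
    | _, _, _ => count) 0
  if count = (B.length : Int) then (Z.length : Int) else -1

-- ===== PORT B =====
def check_triangle_alt (Z : List Int) : Int :=
  let n : Int := Z.length
  if n < 3 then n
  else
    let s := PySem.List.sorted Z (fun x => x) false
    match PySem.List.pyGet? s 0 with
    | none => -1  -- unreachable totalization: here s has length ≥ 3
    | some x =>
      match PySem.List.pyGet? s 1 with
      | none => -1
      | some y =>
        match PySem.List.pyGet? s (-1) with
        | none => -1
        | some w => if x + y > w then n else -1

-- ===== PRECONDITION & SPEC =====
def Spec_check_triangle (Z : List Int) (out : Int) : Prop := out = check_triangle_alt Z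
instance (Z : List Int) (out : Int) : Decidable (Spec_check_triangle Z out) := by unfold Spec_check_triangle; infer_instance

-- ===== CLAIM (what is proved, stated in full; the proofs are below) =====
def Claim_equal_check_triangle : Prop := ∀ (Z : List Int), Dom_check_triangle Z → Spec_check_triangle Z (check_triangle Z)

-- ===== LEMMAS AND PROOFS =====

-- Bool form of A's loop-body test
def pyTriOk (l : List Int) : Bool :=
  match PySem.List.pyGet? l 0, PySem.List.pyGet? l 1, PySem.List.pyGet? l 2 with
  | some a, some b, some c => decide (a + b > c ∧ a + c > b ∧ b + c > a)
  | _, _, _ => false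

-- permutation-invariant form of the triangle test
def TriP (l : List Int) : Prop := ∀ u ∈ l, 2 * u < l.sum

lemma triP_perm {l l' : List Int} (h : l.Perm l') : TriP l ↔ TriP l' := by
  unfold TriP
  rw [h.sum_eq]
  exact ⟨fun H u hu => H u (h.mem_iff.mpr hu), fun H u hu => H u (h.mem_iff.mp hu)⟩

lemma triP_triple (a b c : Int) : TriP [a, b, c] ↔ (a + b > c ∧ a + c > b ∧ b + c > a) := by
  simp only [TriP, List.mem_cons, List.not_mem_nil, or_false, List.sum_cons, List.sum_nil]
  constructor
  · intro H
    exact ⟨by have := H c (by simp); omega, by have := H b (by simp); omega,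
      by have := H a (by simp); omega⟩
  · rintro ⟨h1, h2, h3⟩ u hu
    rcases hu with rfl | rfl | rfl <;> omega

lemma pyTriOk_triple (a b c : Int) : pyTriOk [a, b, c] = true ↔ TriP [a, b, c] := by
  rw [triP_triple]
  simp [pyTriOk, PySem.List.pyGet?, PySem.List.pyIdx?]

lemma head_le_of_pairwise {a : Int} {l : List Int} (hp : List.Pairwise (· ≤ ·) (a :: l))
    {u : Int} (hu : u ∈ a :: l) : a ≤ u := by
  rcases List.mem_cons.mp hu with rfl | hu
  · exact le_refl _
  · exact List.rel_of_pairwise_cons hp hu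

lemma sub2_bounds {a b : Int} {l : List Int} {x y z : Int} {ys : List Int}
    (hp : List.Pairwise (· ≤ ·) (a :: b :: l))
    (hs : (x :: y :: z :: ys).Sublist (a :: b :: l)) : a ≤ x ∧ b ≤ y := by
  cases hs with
  | cons₂ _ h1 =>
    refine ⟨le_refl _, ?_⟩
    have hy : y ∈ b :: l := h1.subset (by simp)
    exact head_le_of_pairwise hp.tail hy
  | cons _ h1 =>
    have hx : x ∈ b :: l := h1.subset (by simp)
    have hy : y ∈ b :: l := h1.subset (by simp)
    exact ⟨le_trans (List.rel_of_pairwise_cons hp (by simp)) (head_le_of_pairwise hp.tail hx),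
      head_le_of_pairwise hp.tail hy⟩

lemma le_getLast_of_pairwise {l : List Int} (hp : List.Pairwise (· ≤ ·) l)
    {u : Int} (hu : u ∈ l) (h : l ≠ []) : u ≤ l.getLast h := by
  have hd := List.dropLast_append_getLast h
  rw [← hd] at hp hu
  rcases List.mem_append.mp hu with h1 | h1
  · exact (List.pairwise_append.mp hp).2.2 u h1 _ (by simp)
  · simp at h1; omega

-- a length-r sublist is a member of permutations(xs, r)
lemma sublist_mem_permutations : ∀ (r : Nat) (l xs : List Int), l.Sublist xs → l.length = r →
    l ∈ PySem.List.permutations xs r := by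
  intro r
  induction r with
  | zero =>
    intro l xs _ hl
    rw [List.length_eq_zero_iff] at hl
    subst hl
    simp [PySem.List.permutations]
  | succ r ih =>
    intro l xs hsub hl
    match l, hl with
    | y :: l', hl =>
      obtain ⟨r₁, r₂, rfl, hy, hl'⟩ := List.cons_sublist_iff.mp hsub
      obtain ⟨p, q, rfl⟩ := List.append_of_mem hy
      rw [PySem.List.permutations]
      rw [List.mem_flatMap]
      refine ⟨p.length, ?_, ?_⟩
      · simp [List.mem_range]
      · have hg : ((p ++ y :: q) ++ r₂)[p.length]? = some y := by
          rw [List.append_assoc, List.getElem?_append_right (by omega)]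
          simp
        have he : ((p ++ y :: q) ++ r₂).eraseIdx p.length = p ++ (q ++ r₂) := by
          rw [List.append_assoc, List.eraseIdx_append_of_length_le (by omega)]
          simp
        rw [hg, he]
        simp only [List.mem_map]
        exact ⟨l', ih l' _ (hl'.trans
          (by rw [← List.append_assoc]; exact List.sublist_append_right (p ++ q) r₂))
          (by simpa using hl), rfl⟩

-- A's counting loop is countP of the Bool test
lemma foldl_step_eq (B : List (List Int)) :
    B.foldl (fun count i =>
      match PySem.List.pyGet? i 0, PySem.List.pyGet? i 1, PySem.List.pyGet? i 2 with
      | some a, some b, some c =>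
          if a + b > c ∧ a + c > b ∧ b + c > a then count + 1 else count
      | _, _, _ => count) (0 : Int) = (B.countP pyTriOk : Int) := by
  have h : (fun (count : Int) (i : List Int) =>
      match PySem.List.pyGet? i 0, PySem.List.pyGet? i 1, PySem.List.pyGet? i 2 with
      | some a, some b, some c =>
          if a + b > c ∧ a + c > b ∧ b + c > a then count + 1 else count
      | _, _, _ => count)
      = (fun count i => if pyTriOk i then count + 1 else count) := by
    funext count i
    unfold pyTriOk
    rcases PySem.List.pyGet? i 0 with _ | a <;> rcases PySem.List.pyGet? i 1 with _ | b <;>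
      rcases PySem.List.pyGet? i 2 with _ | c <;> simp
  rw [h, PySem.List.foldl_count_if]
  simp

-- core equivalence: all ordered triples are triangles iff two smallest sum > largest
lemma allTri_iff (Z : List Int) (s0 s1 s2 : Int) (u : List Int)
    (hs : PySem.List.sorted Z (fun x => x) false = s0 :: s1 :: s2 :: u) :
    (∀ p ∈ PySem.List.permutations Z 3, pyTriOk p = true) ↔
      (s2 :: u).getLast (by simp) < s0 + s1 := by
  have hperm : (PySem.List.sorted Z (fun x => x) false).Perm Z := PySem.List.sorted_perm Z _ false
  have hpair : List.Pairwise (· ≤ ·) (s0 :: s1 :: s2 :: u) := by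
    have := PySem.List.sorted_pairwise Z (fun x => x)
    rwa [hs] at this
  rw [hs] at hperm
  set w : Int := (s2 :: u).getLast (by simp) with hw
  constructor
  · intro hall
    have hsub : ([s0, s1, w]).Sublist (s0 :: s1 :: s2 :: u) := by
      refine List.Sublist.cons₂ _ (List.Sublist.cons₂ _ ?_)
      exact List.singleton_sublist.mpr (List.getLast_mem _)
    have hsp : ([s0, s1, w]).Subperm Z := hsub.subperm.trans hperm.subperm
    obtain ⟨l', hl', hls⟩ := hsp
    have hmem : l' ∈ PySem.List.permutations Z 3 :=
      sublist_mem_permutations 3 l' Z hls (by rw [hl'.length_eq]; rfl)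
    have hok := hall l' hmem
    obtain ⟨a, b, c, rfl⟩ := List.length_eq_three.mp hl'.length_eq
    have htri : TriP [s0, s1, w] := (triP_perm hl').mp ((pyTriOk_triple a b c).mp hok)
    have := htri w (by simp)
    simp at this
    omega
  · intro hlt p hp
    obtain ⟨hlen, rest, hpr⟩ := PySem.List.exists_perm_of_mem_permutations 3 Z p hp
    have hsp : p.Subperm (s0 :: s1 :: s2 :: u) :=
      (((List.sublist_append_left p rest).subperm).trans hpr.subperm).trans hperm.symm.subperm
    obtain ⟨q, hq, hqs⟩ := hsp
    obtain ⟨x, y, z, rfl⟩ := List.length_eq_three.mp (hq.length_eq.trans hlen)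
    have hqp : List.Pairwise (· ≤ ·) [x, y, z] := hpair.sublist hqs
    have hxy : x ≤ y := List.rel_of_pairwise_cons hqp (by simp)
    have hyz : y ≤ z := List.rel_of_pairwise_cons hqp.tail (by simp)
    obtain ⟨h0x, h1y⟩ := sub2_bounds hpair hqs
    have hzw : z ≤ w := by
      have hz : z ∈ s0 :: s1 :: s2 :: u := hqs.subset (by simp)
      have := le_getLast_of_pairwise hpair hz (by simp)
      rw [List.getLast_cons (by simp), List.getLast_cons (by simp)] at this
      exact this
    have htri : TriP [x, y, z] := (triP_triple x y z).mpr (by omega)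
    obtain ⟨a, b, c, rfl⟩ := List.length_eq_three.mp hlen
    exact (pyTriOk_triple a b c).mpr ((triP_perm hq).mp htri)

-- ===== VERDICT (by name: the statement is the Claim_ definition above) =====
theorem check_triangle_spec : Claim_equal_check_triangle := by
  intro Z _
  unfold Spec_check_triangle check_triangle check_triangle_alt
  dsimp only
  by_cases hlen : Z.length < 3
  · rw [PySem.List.permutations_eq_nil_of_length_lt 3 Z hlen]
    simp
    omega
  · rw [not_lt] at hlen
    have hslen : 3 ≤ (PySem.List.sorted Z (fun x => x) false).length := by
      rw [(PySem.List.sorted_perm Z _ false).length_eq]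
      exact hlen
    obtain ⟨s0, s1, s2, u, hs⟩ : ∃ s0 s1 s2 u,
        PySem.List.sorted Z (fun x => x) false = s0 :: s1 :: s2 :: u := by
      rcases hsl : PySem.List.sorted Z (fun x => x) false with _ | ⟨a, _ | ⟨b, _ | ⟨c, t⟩⟩⟩ <;>
        simp [hsl] at hslen ⊢
    rw [hs, foldl_step_eq]
    have hA : ((PySem.List.permutations Z 3).countP pyTriOk : Int)
        = ((PySem.List.permutations Z 3).length : Int)
        ↔ (∀ p ∈ PySem.List.permutations Z 3, pyTriOk p = true) := by
      rw [Int.natCast_inj]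
      exact List.countP_eq_length
    have hget0 : PySem.List.pyGet? (s0 :: s1 :: s2 :: u) 0 = some s0 :=
      PySem.List.pyGet?_zero_cons _ _
    have hget1 : PySem.List.pyGet? (s0 :: s1 :: s2 :: u) 1 = some s1 := by
      simpa using PySem.List.pyGet?_natCast (xs := s0 :: s1 :: s2 :: u) (n := 1)
    have hgetm : PySem.List.pyGet? (s0 :: s1 :: s2 :: u) (-1)
        = some ((s2 :: u).getLast (by simp)) := by
      rw [PySem.List.pyGet?_neg_one]
      rw [List.getLast?_eq_some_getLast (l := s0 :: s1 :: s2 :: u) (by simp)]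
      rw [List.getLast_cons (by simp), List.getLast_cons (by simp)]
    rw [hget0, hget1, hgetm]
    have hnot : ¬ ((Z.length : Int) < 3) := by omega
    rw [if_neg hnot]
    rcases (allTri_iff Z s0 s1 s2 u hs) with ⟨hfwd, hbwd⟩
    by_cases hcond : (s2 :: u).getLast (by simp) < s0 + s1
    · rw [if_pos (hA.mpr (hbwd hcond))]
      dsimp only
      rw [if_pos hcond]
    · rw [if_neg (fun hc => hcond (hfwd (hA.mp hc)))]
      dsimp only
      rw [if_neg hcond]
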